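-- pv_equiv track=rewrite | github.com/wulukewu/cp-code | 20240612 abc275d.py | f
-- ===== SOURCE A (Python) =====
-- arr = {}
--
-- def f(x):
--     if x == 0:
--         return 1
--     else:
--         a = int(x/2)
--         b = int(x/3)
--
--         if a in arr:
--             A = arr[a]
--         else:
--             A = f(a)
--             arr[a] = A
--
--         if b in arr:
--             B = arr[b]
--         else:
--             B = f(b)
--             arr[b] = B
--
--         return A + B
-- ===== SOURCE B (Python) =====
-- def f(x):
--     # Two-phase bottom-up DP instead of memoized top-down recursion:
--     # 1) collect the set of arguments reachable from x via int(v/2)/int(v/3);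
--     # 2) fill a table in order of increasing |v| (children of v are strictly
--     #    smaller in absolute value, so they are always filled first).
--     seen = set()
--
--     def collect(v):
--         if v in seen:
--             return
--         seen.add(v)
--         if v != 0:
--             collect(int(v / 2))
--             collect(int(v / 3))
--
--     collect(x)
--     memo = {}
--     for v in sorted(seen, key=abs):
--         memo[v] = 1 if v == 0 else memo[int(v / 2)] + memo[int(v / 3)]
--     return memo[x]
-- ===== Notes on version B (the rewrite author's own statement) =====
-- stated objective: alternative
-- what changed: Replaces the memoized top-down recursion over a global dict with a two-phase bottom-up DP: first compute the set of reachable arguments, then fill a table in order of increasing absolute value.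
import Mathlib
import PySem

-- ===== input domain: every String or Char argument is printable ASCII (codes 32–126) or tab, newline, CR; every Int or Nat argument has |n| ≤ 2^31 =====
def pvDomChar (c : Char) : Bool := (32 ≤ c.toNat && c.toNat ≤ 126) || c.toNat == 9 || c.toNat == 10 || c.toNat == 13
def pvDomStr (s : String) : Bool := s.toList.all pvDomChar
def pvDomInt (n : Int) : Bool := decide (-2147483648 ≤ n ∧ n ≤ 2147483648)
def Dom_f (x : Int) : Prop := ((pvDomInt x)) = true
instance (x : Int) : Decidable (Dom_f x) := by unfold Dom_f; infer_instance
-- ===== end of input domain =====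

-- B computes the same f(x)=f(int(x/2))+f(int(x/3)), f(0)=1 by a two-phase bottom-up DP
-- (reachable-set + table filled by increasing |v|) instead of A's memoized top-down recursion.
-- Python's int(v/2) / int(v/3) (float division, then truncation) equal truncating integer
-- division Int.tdiv on the domain |x| ≤ 2^31 (all quotients are exact-truncated well below
-- 2^53), so both ports use Int.tdiv; A's global memo `arr` caches only pure values, so the
-- port threads it explicitly starting empty — the return value is identical.

-- termination helper used by the ports (cited in decreasing_by)
theorem tdiv_natAbs_lt (x : Int) (n : Int) (hx : x ≠ 0) (hn : 1 < n.natAbs) :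
    (x.tdiv n).natAbs < x.natAbs := by
  rw [Int.natAbs_tdiv]
  exact Nat.div_lt_self (Int.natAbs_pos.mpr hx) hn

-- ===== PORT A =====
-- the recursion, with the global dict `arr` threaded through as explicit state
def fA (x : Int) (memo : PySem.Dict Int Int) : Int × PySem.Dict Int Int :=
  if _hx : x = 0 then (1, memo)
  else
    let a := x.tdiv 2
    let b := x.tdiv 3
    let pA : Int × PySem.Dict Int Int :=
      match memo.get? a with
      | some v => (v, memo)
      | none => let r := fA a memo
                (r.1, r.2.insert a r.1)
    let pB : Int × PySem.Dict Int Int :=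
      match pA.2.get? b with
      | some v => (v, pA.2)
      | none => let r := fA b pA.2
                (r.1, r.2.insert b r.1)
    (pA.1 + pB.1, pB.2)
termination_by x.natAbs
decreasing_by
  · exact tdiv_natAbs_lt x 2 _hx (by decide)
  · exact tdiv_natAbs_lt x 3 _hx (by decide)

def f (x : Int) : Int := (fA x PySem.Dict.empty).1

-- ===== PORT B =====
-- phase 1: the set of arguments reachable from v (depth-first, `seen` threaded)
def collectB (v : Int) (seen : PySem.Set Int) : PySem.Set Int :=
  if PySem.Set.contains seen v then seen
  else
    let s := PySem.Set.add seen v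
    if _hv : v = 0 then s
    else collectB (v.tdiv 3) (collectB (v.tdiv 2) s)
termination_by v.natAbs
decreasing_by
  · exact tdiv_natAbs_lt v 2 _hv (by decide)
  · exact tdiv_natAbs_lt v 3 _hv (by decide)

-- phase 2: fill the table over the reachable set sorted by |v|; `memo.getD x 0` ports
-- `memo[x]` (exact: x is always a present key, proved below), and likewise the children.
def f_alt (x : Int) : Int :=
  let seen := collectB x PySem.Set.empty
  let order := PySem.List.sorted seen (fun v => v.natAbs) false
  let memo := order.foldl
    (fun m v => m.insert v (if v = 0 then 1 else m.getD (v.tdiv 2) 0 + m.getD (v.tdiv 3) 0))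
    PySem.Dict.empty
  memo.getD x 0

-- ===== PRECONDITION & SPEC =====
def Spec_f (x : Int) (out : Int) : Prop := out = f_alt x
instance (x : Int) (out : Int) : Decidable (Spec_f x out) := by unfold Spec_f; infer_instance

-- ===== CLAIM (what is proved, stated in full; the proofs are below) =====
def Claim_equal_f : Prop := ∀ (x : Int), Dom_f x → Spec_f x (f x)

-- ===== LEMMAS AND PROOFS =====

-- the mathematical recurrence both programs compute
def F (x : Int) : Int :=
  if _hx : x = 0 then 1 else F (x.tdiv 2) + F (x.tdiv 3)
termination_by x.natAbs
decreasing_by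
  · exact tdiv_natAbs_lt x 2 _hx (by decide)
  · exact tdiv_natAbs_lt x 3 _hx (by decide)

-- a memo dict whose every entry is correct
def GoodMemo (d : PySem.Dict Int Int) : Prop := ∀ k v, d.get? k = some v → v = F k

theorem GoodMemo_insert (d : PySem.Dict Int Int) (k : Int) (hd : GoodMemo d) :
    GoodMemo (d.insert k (F k)) := by
  intro k' v h
  rw [PySem.Dict.get?_insert] at h
  split at h
  · cases h; simp [*]
  · exact hd k' v h

-- A-side invariant: from a correct memo, fA returns F x and a correct memo
theorem fA_correct (x : Int) (d : PySem.Dict Int Int) (hd : GoodMemo d) :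
    (fA x d).1 = F x ∧ GoodMemo (fA x d).2 := by
  rw [fA]
  by_cases hx : x = 0
  · simp only [hx, dite_true]
    exact ⟨by rw [F]; simp, hd⟩
  · simp only [hx, dite_false]
    have hA : ∀ (p : Int × PySem.Dict Int Int),
        (p = match d.get? (x.tdiv 2) with
          | some v => (v, d)
          | none => let r := fA (x.tdiv 2) d
                    (r.1, r.2.insert (x.tdiv 2) r.1)) →
        p.1 = F (x.tdiv 2) ∧ GoodMemo p.2 := by
      intro p hp
      cases h2 : d.get? (x.tdiv 2) with
      | some v =>
        rw [h2] at hp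
        exact hp ▸ ⟨hd _ _ h2, hd⟩
      | none =>
        rw [h2] at hp
        have ih := fA_correct (x.tdiv 2) d hd
        subst hp
        refine ⟨ih.1, ?_⟩
        have := GoodMemo_insert (fA (x.tdiv 2) d).2 (x.tdiv 2) ih.2
        rwa [← ih.1] at this
    obtain ⟨h1, hg1⟩ := hA _ rfl
    set pA : Int × PySem.Dict Int Int :=
      (match d.get? (x.tdiv 2) with
        | some v => (v, d)
        | none => let r := fA (x.tdiv 2) d
                  (r.1, r.2.insert (x.tdiv 2) r.1)) with hpA
    have hB : ∀ (q : Int × PySem.Dict Int Int),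
        (q = match pA.2.get? (x.tdiv 3) with
          | some v => (v, pA.2)
          | none => let r := fA (x.tdiv 3) pA.2
                    (r.1, r.2.insert (x.tdiv 3) r.1)) →
        q.1 = F (x.tdiv 3) ∧ GoodMemo q.2 := by
      intro q hq
      cases h3 : pA.2.get? (x.tdiv 3) with
      | some v =>
        rw [h3] at hq
        exact hq ▸ ⟨hg1 _ _ h3, hg1⟩
      | none =>
        rw [h3] at hq
        have ih := fA_correct (x.tdiv 3) pA.2 hg1
        subst hq
        refine ⟨ih.1, ?_⟩
        have := GoodMemo_insert (fA (x.tdiv 3) pA.2).2 (x.tdiv 3) ih.2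
        rwa [← ih.1] at this
    obtain ⟨h2, hg2⟩ := hB _ rfl
    refine ⟨?_, hg2⟩
    simp only [h1, h2]
    conv_rhs => rw [F]
    simp [hx]
termination_by x.natAbs
decreasing_by
  · exact tdiv_natAbs_lt x 2 hx (by decide)
  · exact tdiv_natAbs_lt x 3 hx (by decide)

theorem f_eq_F (x : Int) : f x = F x := by
  have := fA_correct x PySem.Dict.empty (by intro k v h; simp [PySem.Dict.get?_empty] at h)
  exact this.1

-- B-side phase-1 invariant: collectB grows seen, adds v, and every new element is closed
theorem collectB_spec (v : Int) (seen : PySem.Set Int) :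
    (∀ u ∈ seen, u ∈ collectB v seen) ∧ v ∈ collectB v seen ∧
    (∀ u ∈ collectB v seen,
      u ∈ seen ∨ (u ≠ 0 → u.tdiv 2 ∈ collectB v seen ∧ u.tdiv 3 ∈ collectB v seen)) := by
  rw [collectB]
  by_cases hc : PySem.Set.contains seen v
  · simp only [hc, if_true]
    exact ⟨fun u hu => hu, (PySem.Set.contains_iff _ _).mp hc, fun u hu => Or.inl hu⟩
  · simp only [hc]
    by_cases hv : v = 0
    · simp only [hv, dite_true]
      refine ⟨fun u hu => ?_, ?_, fun u hu => ?_⟩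
      · exact (PySem.Set.mem_add _ _ _).mpr (Or.inl hu)
      · exact (PySem.Set.mem_add _ _ _).mpr (Or.inr rfl)
      · rcases (PySem.Set.mem_add _ _ _).mp hu with h | h
        · exact Or.inl h
        · exact Or.inr (fun h0 => absurd h h0)
    · simp only [hv, dite_false]
      obtain ⟨ga2, gb2, gc2⟩ := collectB_spec (v.tdiv 2) (PySem.Set.add seen v)
      obtain ⟨ga3, gb3, gc3⟩ := collectB_spec (v.tdiv 3) (collectB (v.tdiv 2) (PySem.Set.add seen v))
      refine ⟨fun u hu => ga3 _ (ga2 _ ((PySem.Set.mem_add _ _ _).mpr (Or.inl hu))), ?_, ?_⟩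
      · exact ga3 _ (ga2 _ ((PySem.Set.mem_add _ _ _).mpr (Or.inr rfl)))
      · intro u hu
        rcases gc3 u hu with h3 | h3
        · rcases gc2 u h3 with h2 | h2
          · rcases (PySem.Set.mem_add _ _ _).mp h2 with h | h
            · exact Or.inl h
            · subst h
              exact Or.inr (fun _ => ⟨ga3 _ gb2, gb3⟩)
          · exact Or.inr (fun h0 => ⟨ga3 _ (h2 h0).1, ga3 _ (h2 h0).2⟩)
        · exact Or.inr h3
termination_by v.natAbs
decreasing_by
  · exact tdiv_natAbs_lt v 2 hv (by decide)
  · exact tdiv_natAbs_lt v 3 hv (by decide)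

-- B-side phase-2 invariant: folding the remaining (key-sorted) suffix completes the table
theorem fold_correct (S : List Int)
    (hcl : ∀ u ∈ S, u ≠ 0 → u.tdiv 2 ∈ S ∧ u.tdiv 3 ∈ S) :
    ∀ (rest : List Int) (m : PySem.Dict Int Int),
      (∀ u ∈ rest, u ∈ S) →
      rest.Pairwise (fun a b => a.natAbs ≤ b.natAbs) →
      (∀ u ∈ S, u ∉ rest → m.get? u = some (F u)) →
      ∀ u ∈ S,
        (rest.foldl
          (fun m v => m.insert v
            (if v = 0 then 1 else m.getD (v.tdiv 2) 0 + m.getD (v.tdiv 3) 0)) m).get? u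
        = some (F u) := by
  intro rest
  induction rest with
  | nil => intro m _ _ hm u hu; exact hm u hu (by simp)
  | cons v rest ih =>
    intro m hsub hpw hm u hu
    simp only [List.foldl_cons]
    have hvS : v ∈ S := hsub v (by simp)
    -- children of v are already in m
    have hchild : ∀ c : Int, c ∈ S → c.natAbs < v.natAbs → m.get? c = some (F c) := by
      intro c hcS hlt
      refine hm c hcS ?_
      intro hcmem
      rcases List.mem_cons.mp hcmem with h | h
      · subst h; omega
      · have := (List.pairwise_cons.mp hpw).1 c h
        omega
    have hval : (if v = 0 then 1 else m.getD (v.tdiv 2) 0 + m.getD (v.tdiv 3) 0) = F v := by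
      by_cases hv : v = 0
      · subst hv; rw [F]; simp
      · have h2 := hchild (v.tdiv 2) ((hcl v hvS hv).1) (tdiv_natAbs_lt v 2 hv (by decide))
        have h3 := hchild (v.tdiv 3) ((hcl v hvS hv).2) (tdiv_natAbs_lt v 3 hv (by decide))
        simp only [hv, if_false]
        rw [PySem.Dict.getD_eq_get?_getD, PySem.Dict.getD_eq_get?_getD, h2, h3]
        conv_rhs => rw [F]
        simp [hv]
    refine ih _ (fun u hu => hsub u (by simp [hu])) (List.pairwise_cons.mp hpw).2 ?_ u hu
    intro u huS hurest
    rw [PySem.Dict.get?_insert]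
    split
    · rename_i heq; subst heq; rw [hval]
    · rename_i hne
      refine hm u huS ?_
      intro hmem
      rcases List.mem_cons.mp hmem with h | h
      · exact hne h
      · exact hurest h
  
theorem f_alt_eq_F (x : Int) : f_alt x = F x := by
  have hdef : f_alt x =
      ((PySem.List.sorted (collectB x PySem.Set.empty) (fun v => v.natAbs) false).foldl
        (fun m v => m.insert v
          (if v = 0 then 1 else m.getD (v.tdiv 2) 0 + m.getD (v.tdiv 3) 0))
        PySem.Dict.empty).getD x 0 := rfl
  rw [hdef]
  obtain ⟨_, hb, hc⟩ := collectB_spec x PySem.Set.empty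
  set S := collectB x PySem.Set.empty with hS
  have hcl : ∀ u ∈ S, u ≠ 0 → u.tdiv 2 ∈ S ∧ u.tdiv 3 ∈ S := by
    intro u hu h0
    rcases hc u hu with h | h
    · simp [PySem.Set.empty] at h
    · exact h h0
  have hperm := PySem.List.sorted_perm (xs := S) (key := fun v : Int => v.natAbs) (rev := false)
  have hget := fold_correct S hcl (PySem.List.sorted S (fun v => v.natAbs) false)
    PySem.Dict.empty
    (fun u hu => hperm.mem_iff.mp hu)
    (PySem.List.sorted_pairwise S (fun v => v.natAbs))
    (by
      intro u huS hnot
      exact absurd (hperm.mem_iff.mpr huS) hnot)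
    x hb
  rw [PySem.Dict.getD_eq_get?_getD, hget]
  rfl

-- ===== VERDICT (by name: the statement is the Claim_ definition above) =====
theorem f_spec : Claim_equal_f := by
  intro x _
  unfold Spec_f
  rw [f_eq_F, f_alt_eq_F]
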